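-- pv_equiv track=rewrite | github.com/alexis-zorba/Hardnessware | scripts/round7_premium_roi_benchmark.py | should_escalate_pre
-- ===== SOURCE A (Python) =====
-- def should_escalate_pre(task: dict) -> bool:
--     text = f"{task.get('name', '')} {task.get('task', '')}".lower()
--     tokens = (
--         "ambiguous",
--         "uncertainty",
--         "conflict",
--         "decide",
--         "write",
--         "policy",
--         "multi_file",
--         "routing_contract",
--         "nonexistent",
--         "noisy",
--         "signal_extraction",
--         "across docs",
--     )
--     return any(token in text for token in tokens)
-- ===== SOURCE B (Python) =====
-- def should_escalate_pre(task: dict) -> bool: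
--     text = f"{task.get('name', '')} {task.get('task', '')}".lower()
--     tokens = (
--         "ambiguous",
--         "uncertainty",
--         "conflict",
--         "decide",
--         "write",
--         "policy",
--         "multi_file",
--         "routing_contract",
--         "nonexistent",
--         "noisy",
--         "signal_extraction",
--         "across docs",
--     )
--     # single left-to-right scan over text positions, testing all tokens as prefixes at once
--     for i in range(len(text)):
--         if text.startswith(tokens, i):
--             return True
--     return False
-- ===== Notes on version B (the rewrite author's own statement) =====
-- stated objective: alternative
-- what changed: Replaces the Python-level loop of per-token 'token in text' substring searches by one left-to-right scan over the positions of text, testing all tokens at once with tuple-argument str.startswith(tokens, i).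
import Mathlib
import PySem

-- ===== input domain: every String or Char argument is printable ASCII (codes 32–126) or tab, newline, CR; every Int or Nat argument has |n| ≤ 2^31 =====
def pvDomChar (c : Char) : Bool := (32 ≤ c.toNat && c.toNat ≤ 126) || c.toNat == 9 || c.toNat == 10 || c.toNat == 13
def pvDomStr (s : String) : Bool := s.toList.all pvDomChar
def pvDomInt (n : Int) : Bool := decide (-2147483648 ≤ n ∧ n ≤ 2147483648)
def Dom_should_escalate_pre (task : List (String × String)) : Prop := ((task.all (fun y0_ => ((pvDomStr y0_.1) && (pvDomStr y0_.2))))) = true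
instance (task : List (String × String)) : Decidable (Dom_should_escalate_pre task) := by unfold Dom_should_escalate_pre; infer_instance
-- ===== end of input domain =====

-- B replaces the Python-level loop of `token in text` substring tests by one left-to-right
-- scan over text positions with a tuple-argument `text.startswith(tokens, i)` test (idiomatic;
-- same asymptotic cost).

-- the shared literal token tuple (identical in A and B)
def escTokens : List (List Char) :=
  ["ambiguous".toList, "uncertainty".toList, "conflict".toList, "decide".toList,
   "write".toList, "policy".toList, "multi_file".toList, "routing_contract".toList,
   "nonexistent".toList, "noisy".toList, "signal_extraction".toList, "across docs".toList]

-- ===== PORT A =====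
def should_escalate_pre (task : List (String × String)) : Bool :=
  let text := PySem.Chars.lower
    ((PySem.Dict.getD ⟨task⟩ "name" "").toList ++ ' ' :: (PySem.Dict.getD ⟨task⟩ "task" "").toList)
  escTokens.any (fun token => PySem.Chars.isIn token text)

-- ===== PORT B =====
-- the `for i in range(len(text))` loop: recursion over the suffixes of text
def pvScan : List Char → Bool
  | [] => false
  | c :: rest =>
    escTokens.any (fun tok => PySem.Chars.startswith (c :: rest) tok) || pvScan rest

def should_escalate_pre_alt (task : List (String × String)) : Bool :=
  let text := PySem.Chars.lower
    ((PySem.Dict.getD ⟨task⟩ "name" "").toList ++ ' ' :: (PySem.Dict.getD ⟨task⟩ "task" "").toList)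
  pvScan text

-- ===== PRECONDITION & SPEC =====
def Spec_should_escalate_pre (task : List (String × String)) (out : Bool) : Prop := out = should_escalate_pre_alt task
instance (task : List (String × String)) (out : Bool) : Decidable (Spec_should_escalate_pre task out) := by unfold Spec_should_escalate_pre; infer_instance

-- ===== CLAIM (what is proved, stated in full; the proofs are below) =====
def Claim_equal_should_escalate_pre : Prop := ∀ (task : List (String × String)), Dom_should_escalate_pre task → Spec_should_escalate_pre task (should_escalate_pre task)

-- ===== LEMMAS AND PROOFS =====

-- per-token cons step: `tok in (c :: rest)` is a prefix test at the head, or `tok in rest`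
theorem isIn_cons_step (tok : List Char) (c : Char) (rest : List Char) :
    PySem.Chars.isIn tok (c :: rest)
      = (PySem.Chars.startswith (c :: rest) tok || PySem.Chars.isIn tok rest) := by
  apply Bool.eq_iff_iff.mpr
  simp only [Bool.or_eq_true, PySem.Chars.isIn_iff_infix, PySem.Chars.startswith_iff]
  exact List.infix_cons_iff

theorem pvScan_eq (cs : List Char) :
    pvScan cs = escTokens.any (fun tok => PySem.Chars.isIn tok cs) := by
  induction cs with
  | nil => decide
  | cons c rest ih =>
    rw [pvScan, ih]
    rw [show (escTokens.any fun tok => PySem.Chars.isIn tok (c :: rest))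
          = escTokens.any fun tok =>
              (PySem.Chars.startswith (c :: rest) tok || PySem.Chars.isIn tok rest) from
        PySem.List.any_congr_mem (fun tok _ => isIn_cons_step tok c rest)]
    apply Bool.eq_iff_iff.mpr
    simp only [Bool.or_eq_true, List.any_eq_true]
    constructor
    · rintro (⟨x, hx, h⟩ | ⟨x, hx, h⟩)
      exacts [⟨x, hx, Or.inl h⟩, ⟨x, hx, Or.inr h⟩]
    · rintro ⟨x, hx, h | h⟩
      exacts [Or.inl ⟨x, hx, h⟩, Or.inr ⟨x, hx, h⟩]

-- ===== VERDICT (by name: the statement is the Claim_ definition above) =====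
theorem should_escalate_pre_spec : Claim_equal_should_escalate_pre := by
  intro task _
  unfold Spec_should_escalate_pre should_escalate_pre should_escalate_pre_alt
  rw [pvScan_eq]
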